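-- pv_equiv track=rewrite | github.com/Tprkgn/BasicPython | HW2_-_All_Solutions.py | split_stack
-- ===== SOURCE A (Python) =====
-- def split_stack(list):
--     auxilary_positive = []
--     auxilary_negative = []
--
--     for i in list:
--         if i >= 0:
--             auxilary_positive.append(i)
--         else:
--             auxilary_negative.append(i)
--
--     list.clear()
--     for i in range(len(auxilary_negative)):
--         list.append(auxilary_negative.pop())
--
--     for i in range(len(auxilary_positive)):
--         list.append(auxilary_positive.pop())
--     return list
-- ===== SOURCE B (Python) =====
-- def split_stack(list):
--     list[:] = sorted(reversed(list), key=lambda x: x >= 0)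
--     return list
-- ===== Notes on version B (the rewrite author's own statement) =====
-- stated objective: idiomatic
-- what changed: Replaces A's partition-into-two-auxiliary-stacks plus two pop loops by a single stable sort of the reversed list keyed on the boolean x >= 0 (stability of Python's sort makes each sign group keep the reversed order), assigned back via list[:]; both versions mutate the argument in place identically.
import Mathlib
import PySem

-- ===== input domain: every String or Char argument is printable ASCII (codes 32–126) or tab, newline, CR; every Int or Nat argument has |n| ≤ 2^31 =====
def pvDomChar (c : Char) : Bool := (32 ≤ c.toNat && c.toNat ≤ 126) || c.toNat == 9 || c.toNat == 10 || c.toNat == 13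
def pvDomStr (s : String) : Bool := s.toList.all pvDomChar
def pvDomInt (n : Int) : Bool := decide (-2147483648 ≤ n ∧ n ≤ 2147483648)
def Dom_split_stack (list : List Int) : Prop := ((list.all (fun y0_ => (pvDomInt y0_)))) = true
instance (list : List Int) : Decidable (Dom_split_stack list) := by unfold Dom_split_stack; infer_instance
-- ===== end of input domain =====

-- B replaces A's partition-and-pop-loops by one stable sort of the reversed list keyed on
-- the boolean x >= 0 (idiomatic); equivalence is about the return value — both Pythons
-- mutate the argument in place identically.

-- ===== PORT A =====
-- .pop() on a Python list is PySem.List.pop? (default index -1); with the range fuel equal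
-- to the list's length the none (IndexError) branch is unreachable.
def split_stack (list : List Int) : List Int :=
  let aux := list.foldl (fun (s : List Int × List Int) i =>
      if i ≥ 0 then (s.1 ++ [i], s.2) else (s.1, s.2 ++ [i])) ([], [])
  let popStep := fun (s : List Int × List Int) (_ : Int) =>
      match PySem.List.pop? s.2 with   -- list.pop(): none = IndexError, unreachable here
      | some (v, rest) => (s.1 ++ [v], rest)
      | none => s
  let s1 := (PySem.List.pyRange 0 (aux.2.length) 1).foldl popStep ([], aux.2)
  let s2 := (PySem.List.pyRange 0 (aux.1.length) 1).foldl popStep (s1.1, aux.1)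
  s2.1

-- ===== PORT B =====
-- Python's boolean key (False < True) is ported as the Int key 0/1.
def split_stack_alt (list : List Int) : List Int :=
  PySem.List.sorted list.reverse (fun x => if x ≥ 0 then (1 : Int) else 0) false

-- ===== PRECONDITION & SPEC =====
def Spec_split_stack (list : List Int) (out : List Int) : Prop := out = split_stack_alt list
instance (list : List Int) (out : List Int) : Decidable (Spec_split_stack list out) := by unfold Spec_split_stack; infer_instance

-- ===== CLAIM (what is proved, stated in full; the proofs are below) =====
def Claim_equal_split_stack : Prop := ∀ (list : List Int), Dom_split_stack list → Spec_split_stack list (split_stack list)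

-- ===== LEMMAS AND PROOFS =====

-- A's partition loop computes the two filters.
theorem pv_partitionA (l : List Int) (p n : List Int) :
    l.foldl (fun (s : List Int × List Int) i =>
      if i ≥ 0 then (s.1 ++ [i], s.2) else (s.1, s.2 ++ [i])) (p, n)
    = (p ++ l.filter (fun i => decide (0 ≤ i)), n ++ l.filter (fun i => decide (i < 0))) := by
  induction l generalizing p n with
  | nil => simp
  | cons x xs ih =>
    by_cases hx : 0 ≤ x
    · simp [List.foldl_cons, hx, ih, not_lt.mpr hx]
    · simp [List.foldl_cons, hx, ih, not_le.mp hx]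

-- a fold whose function ignores the element is an iterate of the state function
theorem pv_foldl_ignore {α β : Type} (g : β → β) (l : List α) (s : β) :
    l.foldl (fun s _ => g s) s = g^[l.length] s := by
  induction l generalizing s with
  | nil => rfl
  | cons x xs ih => simp [List.foldl_cons, ih, Function.iterate_succ_apply]

-- A pop-loop over range(len(aux)) appends aux reversed and empties aux.
theorem pv_popIter (aux acc : List Int) :
    (fun (s : List Int × List Int) =>
      match PySem.List.pop? s.2 with
      | some (v, rest) => (s.1 ++ [v], rest)
      | none => s)^[aux.length] (acc, aux) = (acc ++ aux.reverse, []) := by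
  induction aux using List.reverseRecOn generalizing acc with
  | nil => simp
  | append_singleton xs x ih =>
    rw [List.length_append, List.length_singleton, Function.iterate_succ_apply]
    simp only [PySem.List.pop?_last]
    rw [ih (acc ++ [x])]
    simp

theorem pv_popLoop (aux acc : List Int) :
    (PySem.List.pyRange 0 (aux.length) 1).foldl
      (fun (s : List Int × List Int) (_ : Int) =>
        match PySem.List.pop? s.2 with
        | some (v, rest) => (s.1 ++ [v], rest)
        | none => s) (acc, aux)
    = (acc ++ aux.reverse, []) := by
  have hlen : (PySem.List.pyRange 0 (aux.length) 1).length = aux.length := by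
    simp [PySem.List.length_pyRange_one]
  rw [pv_foldl_ignore, hlen, pv_popIter]

-- the 0/1 key used by B
def pvKey (x : Int) : Int := if x ≥ 0 then 1 else 0

-- Inserting x into a list of the shape (all keys 0) ++ (all keys 1): a key-0 element goes
-- between the blocks, a key-1 element goes at the end (stable insertion).
theorem pv_insertBy_blocks (neg pos : List Int) (x : Int)
    (hn : ∀ a ∈ neg, pvKey a = 0) (hp : ∀ b ∈ pos, pvKey b = 1) :
    PySem.List.insertBy (fun a b => decide (pvKey a < pvKey b)) x (neg ++ pos)
    = if pvKey x = 0 then neg ++ x :: pos else neg ++ pos ++ [x] := by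
  by_cases hx : pvKey x = 0
  · simp only [hx]
    induction neg with
    | nil =>
      cases pos with
      | nil => simp [PySem.List.insertBy]
      | cons b bs =>
        have hb : pvKey b = 1 := hp b (List.mem_cons_self)
        simp [PySem.List.insertBy, hx, hb]
    | cons a as ih =>
      have ha : pvKey a = 0 := hn a (List.mem_cons_self)
      simp only [List.cons_append, PySem.List.insertBy, hx, ha]
      norm_num
      exact ih (fun a ha' => hn a (List.mem_cons_of_mem _ ha'))
  · have hx1 : pvKey x = 1 := by unfold pvKey at *; split_ifs at * <;> simp_all
    rw [if_neg hx]
    rw [PySem.List.insertBy_of_forall_not_before]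
    intro y hy
    rcases List.mem_append.mp hy with h | h
    · simp [hn y h, hx1]
    · simp [hp y h, hx1]

-- B's insertion sort over any prefix, from a two-block state, stays two-block:
theorem pv_sortInvariant (l neg pos : List Int)
    (hn : ∀ a ∈ neg, pvKey a = 0) (hp : ∀ b ∈ pos, pvKey b = 1) :
    l.foldl (fun acc x => PySem.List.insertBy (fun a b => decide (pvKey a < pvKey b)) x acc)
      (neg ++ pos)
    = (neg ++ l.filter (fun x => decide (x < 0))) ++ (pos ++ l.filter (fun x => decide (0 ≤ x))) := by
  induction l generalizing neg pos with
  | nil => simp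
  | cons x xs ih =>
    by_cases hx : x < 0
    · have hk : pvKey x = 0 := by simp [pvKey, not_le.mpr hx]
      have step := pv_insertBy_blocks neg pos x hn hp
      rw [if_pos hk] at step
      simp only [List.foldl_cons, step]
      have hn' : ∀ a ∈ neg ++ [x], pvKey a = 0 := by
        intro a ha; rcases List.mem_append.mp ha with h | h
        · exact hn a h
        · simp at h; subst h; exact hk
      have := ih (neg ++ [x]) pos hn' hp
      simp only [List.append_assoc, List.singleton_append] at this ⊢
      rw [this]
      simp [hx, not_le.mpr hx]
    · have hk : pvKey x = 1 := by simp [pvKey, not_lt.mp hx]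
      have step := pv_insertBy_blocks neg pos x hn hp
      have hk0 : ¬ pvKey x = 0 := by omega
      rw [if_neg hk0] at step
      simp only [List.foldl_cons, step]
      have hp' : ∀ b ∈ pos ++ [x], pvKey b = 1 := by
        intro b hb; rcases List.mem_append.mp hb with h | h
        · exact hp b h
        · simp at h; subst h; exact hk
      have := ih neg (pos ++ [x]) hn hp'
      simp only [List.append_assoc, List.singleton_append] at this ⊢
      rw [this]
      simp [hx, not_lt.mp hx]

-- B = stable sort by the 0/1 key = negatives ++ non-negatives of the traversed list.
theorem pv_sortedBlocks (l : List Int) :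
    PySem.List.sorted l (fun x => if x ≥ 0 then (1 : Int) else 0) false
    = l.filter (fun x => decide (x < 0)) ++ l.filter (fun x => decide (0 ≤ x)) := by
  have h := PySem.List.sorted_eq_foldl_insertBy l (fun x => if x ≥ 0 then (1 : Int) else 0)
  rw [h]
  have := pv_sortInvariant l [] [] (by simp) (by simp)
  simpa [pvKey] using this

-- ===== VERDICT (by name: the statement is the Claim_ definition above) =====
theorem split_stack_spec : Claim_equal_split_stack := by
  intro l _
  unfold Spec_split_stack split_stack split_stack_alt
  simp only [pv_partitionA, List.nil_append, pv_popLoop, pv_sortedBlocks,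
    List.filter_reverse]
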